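-- pv_equiv track=rewrite | github.com/Pumpkin-NN/Cryptography | RSA/Algorithm/simplified_text#2.py | plaintext_decryption_graphs
-- ===== SOURCE A (Python) =====
-- import copy
--
-- def plaintext_decryption_graphs(*List):
--     List = copy.deepcopy(*List)
--     text = []
--     for i in List:
--         sixth_block = i // (26**5)
--         text.append(sixth_block)
--
--         r1 = i % (26**5)
--         fifth_block = r1 // (26**4)
--         text.append(fifth_block)
--
--         r2 = r1 % (26**4)
--         fourth_block = r2 // (26**3)
--         text.append(fourth_block)
--
--         r3 = r2 % (26**3)
--         third_block = r3 // (26**2)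
--         text.append(third_block)
--
--         r4 = r3 % (26**2)
--         second_block = r4 // (26**1)
--         text.append(second_block)
--
--         r5 = r4 % (26**1)
--         first_block = r5
--         text.append(first_block)
--     return text
-- ===== SOURCE B (Python) =====
-- import copy
--
-- def plaintext_decryption_graphs(*List):
--     List = copy.deepcopy(*List)
--     text = []
--     for i in List:
--         q = i
--         rs = []
--         for _ in range(5):
--             q, r = divmod(q, 26)
--             rs.append(r)
--         rs.append(q)
--         text.extend(reversed(rs))
--     return text
-- ===== Notes on version B (the rewrite author's own statement) =====
-- stated objective: simpler
-- what changed: Replaces the six unrolled floordiv/mod stanzas by a repeated divmod(q,26) loop that collects the five low digits plus the final quotient and emits them reversed.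
import Mathlib
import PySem

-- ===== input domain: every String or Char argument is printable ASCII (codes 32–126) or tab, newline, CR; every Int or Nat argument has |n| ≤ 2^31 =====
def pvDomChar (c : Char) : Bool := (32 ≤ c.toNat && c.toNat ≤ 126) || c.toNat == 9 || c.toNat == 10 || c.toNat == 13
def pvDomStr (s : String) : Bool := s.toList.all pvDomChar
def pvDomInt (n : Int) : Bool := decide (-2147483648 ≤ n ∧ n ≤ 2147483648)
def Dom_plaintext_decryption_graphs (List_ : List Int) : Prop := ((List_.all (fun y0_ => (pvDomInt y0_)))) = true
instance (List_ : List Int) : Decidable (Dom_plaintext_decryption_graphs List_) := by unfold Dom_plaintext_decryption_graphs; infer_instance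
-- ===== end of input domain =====

-- B replaces A's six unrolled floordiv/mod stanzas by a repeated divmod-by-26 loop that
-- collects remainders and emits them reversed (objective: simpler).
-- Both Pythons deepcopy their argument; the equivalence proved is about the return value.

-- ===== PORT A =====
def plaintext_decryption_graphs (List_ : List Int) : List Int :=
  List_.foldl (fun text i =>
    let sixth_block := PySem.Int.floordiv i (26^5)
    let text := text ++ [sixth_block]
    let r1 := PySem.Int.mod i (26^5)
    let fifth_block := PySem.Int.floordiv r1 (26^4)
    let text := text ++ [fifth_block]
    let r2 := PySem.Int.mod r1 (26^4)
    let fourth_block := PySem.Int.floordiv r2 (26^3)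
    let text := text ++ [fourth_block]
    let r3 := PySem.Int.mod r2 (26^3)
    let third_block := PySem.Int.floordiv r3 (26^2)
    let text := text ++ [third_block]
    let r4 := PySem.Int.mod r3 (26^2)
    let second_block := PySem.Int.floordiv r4 (26^1)
    let text := text ++ [second_block]
    let r5 := PySem.Int.mod r4 (26^1)
    let first_block := r5
    text ++ [first_block]) []

-- ===== PORT B =====
-- inner loop of Source B: five iterations of `q, r = divmod(q, 26)` collecting the r's,
-- then the final quotient, emitted in reversed order
def plaintext_decryption_graphs_alt (List_ : List Int) : List Int :=
  List_.foldl (fun text i =>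
    let s := (List.range 5).foldl
      (fun (s : Int × List Int) _ =>
        (PySem.Int.floordiv s.1 26, s.2 ++ [PySem.Int.mod s.1 26])) (i, [])
    text ++ (s.2 ++ [s.1]).reverse) []

-- ===== PRECONDITION & SPEC =====
def Spec_plaintext_decryption_graphs (List_ : List Int) (out : List Int) : Prop := out = plaintext_decryption_graphs_alt List_
instance (List_ : List Int) (out : List Int) : Decidable (Spec_plaintext_decryption_graphs List_ out) := by unfold Spec_plaintext_decryption_graphs; infer_instance

-- ===== CLAIM (what is proved, stated in full; the proofs are below) =====
def Claim_equal_plaintext_decryption_graphs : Prop := ∀ (List_ : List Int), Dom_plaintext_decryption_graphs List_ → Spec_plaintext_decryption_graphs List_ (plaintext_decryption_graphs List_)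

-- ===== LEMMAS AND PROOFS =====

-- (a % (b*c)) / b = (a / b) % c : the digit a program extracts by mod-then-div
-- equals the one extracted by div-then-mod
theorem pv_key (a b c : Int) (hb : 0 < b) (hc : 0 < c) : (a % (b*c)) / b = (a / b) % c := by
  have h0 : 0 ≤ a % (b*c) := Int.emod_nonneg a (by positivity : (0:Int) < b*c).ne'
  have h1 : a % (b*c) < b*c := Int.emod_lt_of_pos a (by positivity)
  have hd : a = (b*c) * (a/(b*c)) + a % (b*c) := by
    have := Int.mul_ediv_add_emod a (b*c); linarith
  have h2 : a / b = (a % (b*c)) / b + c * (a/(b*c)) := by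
    conv_lhs => rw [hd]
    rw [show (b*c) * (a/(b*c)) + a % (b*c) = a % (b*c) + (c * (a/(b*c))) * b by ring,
        Int.add_mul_ediv_right _ _ hb.ne']
  have h3 : (a % (b*c)) / b < c := by
    rw [Int.ediv_lt_iff_lt_mul hb]; linarith [mul_comm b c]
  have h4 : 0 ≤ (a % (b*c)) / b := Int.ediv_nonneg h0 hb.le
  rw [h2, Int.add_mul_emod_self_left, Int.emod_eq_of_lt h4 h3]

theorem pv_divdiv (a b c : Int) (hb : 0 ≤ b) : a / b / c = a / (b * c) :=
  Int.ediv_ediv_of_nonneg hb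

-- per-element equality: A's six blocks equal B's reversed remainder list
theorem pv_blocks_eq (i : Int) :
    [PySem.Int.floordiv i (26^5),
     PySem.Int.floordiv (PySem.Int.mod i (26^5)) (26^4),
     PySem.Int.floordiv (PySem.Int.mod (PySem.Int.mod i (26^5)) (26^4)) (26^3),
     PySem.Int.floordiv (PySem.Int.mod (PySem.Int.mod (PySem.Int.mod i (26^5)) (26^4)) (26^3)) (26^2),
     PySem.Int.floordiv (PySem.Int.mod (PySem.Int.mod (PySem.Int.mod (PySem.Int.mod i (26^5)) (26^4)) (26^3)) (26^2)) (26^1),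
     PySem.Int.mod (PySem.Int.mod (PySem.Int.mod (PySem.Int.mod (PySem.Int.mod i (26^5)) (26^4)) (26^3)) (26^2)) (26^1)]
    =
    [PySem.Int.floordiv (PySem.Int.floordiv (PySem.Int.floordiv (PySem.Int.floordiv (PySem.Int.floordiv i 26) 26) 26) 26) 26,
     PySem.Int.mod (PySem.Int.floordiv (PySem.Int.floordiv (PySem.Int.floordiv (PySem.Int.floordiv i 26) 26) 26) 26) 26,
     PySem.Int.mod (PySem.Int.floordiv (PySem.Int.floordiv (PySem.Int.floordiv i 26) 26) 26) 26,
     PySem.Int.mod (PySem.Int.floordiv (PySem.Int.floordiv i 26) 26) 26,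
     PySem.Int.mod (PySem.Int.floordiv i 26) 26,
     PySem.Int.mod i 26] := by
  simp only [PySem.Int.floordiv_eq_ediv_of_pos (show (0:Int) < 26 by norm_num),
             PySem.Int.floordiv_eq_ediv_of_pos (show (0:Int) < 26^1 by norm_num),
             PySem.Int.floordiv_eq_ediv_of_pos (show (0:Int) < 26^2 by norm_num),
             PySem.Int.floordiv_eq_ediv_of_pos (show (0:Int) < 26^3 by norm_num),
             PySem.Int.floordiv_eq_ediv_of_pos (show (0:Int) < 26^4 by norm_num),
             PySem.Int.floordiv_eq_ediv_of_pos (show (0:Int) < 26^5 by norm_num),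
             PySem.Int.mod_eq_emod_of_pos (show (0:Int) < 26 by norm_num),
             PySem.Int.mod_eq_emod_of_pos (show (0:Int) < 26^1 by norm_num),
             PySem.Int.mod_eq_emod_of_pos (show (0:Int) < 26^2 by norm_num),
             PySem.Int.mod_eq_emod_of_pos (show (0:Int) < 26^3 by norm_num),
             PySem.Int.mod_eq_emod_of_pos (show (0:Int) < 26^4 by norm_num),
             PySem.Int.mod_eq_emod_of_pos (show (0:Int) < 26^5 by norm_num)]
  -- collapse nested divisions and nested mods
  have d2 : i / 26 / 26 = i / 26^2 := by rw [pv_divdiv _ _ _ (by norm_num)]; norm_num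
  have d3 : i / 26 / 26 / 26 = i / 26^3 := by rw [d2, pv_divdiv _ _ _ (by norm_num : (0:Int) ≤ 26^2)]; norm_num
  have d4 : i / 26 / 26 / 26 / 26 = i / 26^4 := by rw [d3, pv_divdiv _ _ _ (by norm_num : (0:Int) ≤ 26^3)]; norm_num
  have d5 : i / 26 / 26 / 26 / 26 / 26 = i / 26^5 := by rw [d4, pv_divdiv _ _ _ (by norm_num : (0:Int) ≤ 26^4)]; norm_num
  have m4 : i % 26^5 % 26^4 = i % 26^4 := by
    rw [show (26:Int)^5 = 26^4 * 26 by norm_num]; exact Int.mod_mul_right_mod i (26^4) 26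
  have m3 : i % 26^4 % 26^3 = i % 26^3 := by
    rw [show (26:Int)^4 = 26^3 * 26 by norm_num]; exact Int.mod_mul_right_mod i (26^3) 26
  have m2 : i % 26^3 % 26^2 = i % 26^2 := by
    rw [show (26:Int)^3 = 26^2 * 26 by norm_num]; exact Int.mod_mul_right_mod i (26^2) 26
  have m1 : i % 26^2 % 26^1 = i % 26 := by
    rw [show (26:Int)^2 = 26^1 * 26 by norm_num]
    exact Int.mod_mul_right_mod i (26^1) 26
  have k5 : i % 26^5 / 26^4 = i / 26^4 % 26 := by
    rw [show (26:Int)^5 = 26^4 * 26 by norm_num]; exact pv_key i (26^4) 26 (by norm_num) (by norm_num)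
  have k4 : i % 26^4 / 26^3 = i / 26^3 % 26 := by
    rw [show (26:Int)^4 = 26^3 * 26 by norm_num]; exact pv_key i (26^3) 26 (by norm_num) (by norm_num)
  have k3 : i % 26^3 / 26^2 = i / 26^2 % 26 := by
    rw [show (26:Int)^3 = 26^2 * 26 by norm_num]; exact pv_key i (26^2) 26 (by norm_num) (by norm_num)
  have k2 : i % 26^2 / 26^1 = i / 26^1 % 26 := by
    rw [show (26:Int)^2 = 26^1 * 26 by norm_num]; exact pv_key i (26^1) 26 (by norm_num) (by norm_num)
  rw [k5, m4, k4, m3, k3, m2, k2, m1, d5, d4, d3, d2]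
  norm_num

theorem pv_fold_eq (l : List Int) : ∀ acc : List Int,
    l.foldl (fun text i =>
      let sixth_block := PySem.Int.floordiv i (26^5)
      let text := text ++ [sixth_block]
      let r1 := PySem.Int.mod i (26^5)
      let fifth_block := PySem.Int.floordiv r1 (26^4)
      let text := text ++ [fifth_block]
      let r2 := PySem.Int.mod r1 (26^4)
      let fourth_block := PySem.Int.floordiv r2 (26^3)
      let text := text ++ [fourth_block]
      let r3 := PySem.Int.mod r2 (26^3)
      let third_block := PySem.Int.floordiv r3 (26^2)
      let text := text ++ [third_block]
      let r4 := PySem.Int.mod r3 (26^2)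
      let second_block := PySem.Int.floordiv r4 (26^1)
      let text := text ++ [second_block]
      let r5 := PySem.Int.mod r4 (26^1)
      let first_block := r5
      text ++ [first_block]) acc
    = l.foldl (fun text i =>
      let s := (List.range 5).foldl
        (fun (s : Int × List Int) _ =>
          (PySem.Int.floordiv s.1 26, s.2 ++ [PySem.Int.mod s.1 26])) (i, [])
      text ++ (s.2 ++ [s.1]).reverse) acc := by
  induction l with
  | nil => intro acc; rfl
  | cons i t ih =>
    intro acc
    simp only [List.foldl_cons]
    rw [ih]
    congr 1
    show (((((acc ++ [PySem.Int.floordiv i (26^5)])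
      ++ [PySem.Int.floordiv (PySem.Int.mod i (26^5)) (26^4)])
      ++ [PySem.Int.floordiv (PySem.Int.mod (PySem.Int.mod i (26^5)) (26^4)) (26^3)])
      ++ [PySem.Int.floordiv (PySem.Int.mod (PySem.Int.mod (PySem.Int.mod i (26^5)) (26^4)) (26^3)) (26^2)])
      ++ [PySem.Int.floordiv (PySem.Int.mod (PySem.Int.mod (PySem.Int.mod (PySem.Int.mod i (26^5)) (26^4)) (26^3)) (26^2)) (26^1)])
      ++ [PySem.Int.mod (PySem.Int.mod (PySem.Int.mod (PySem.Int.mod (PySem.Int.mod i (26^5)) (26^4)) (26^3)) (26^2)) (26^1)]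
      = _
    simp only [List.append_assoc, List.cons_append, List.nil_append,
               List.reverse_append, List.reverse_cons, List.reverse_nil]
    rw [show ∀ a b c d e f : Int, a :: b :: c :: d :: e :: f :: ([] : List Int) = [a,b,c,d,e,f] from fun _ _ _ _ _ _ => rfl]
    exact congrArg (acc ++ ·) (pv_blocks_eq i)

-- ===== VERDICT (by name: the statement is the Claim_ definition above) =====
theorem plaintext_decryption_graphs_spec : Claim_equal_plaintext_decryption_graphs := by
  intro List_ _
  unfold Spec_plaintext_decryption_graphs plaintext_decryption_graphs plaintext_decryption_graphs_alt
  exact pv_fold_eq List_ []
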